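-- pv_equiv track=rewrite | github.com/JonySheep/BazingaTurk | analysis/answer/views.py | formTags
-- ===== SOURCE A (Python) =====
-- from collections import defaultdict
--
-- def formTags(tagList,attributeSize):
--     tags = defaultdict(list)
--     tagsTemp = []
--     for i in range(0,len(tagList),attributeSize):
--         temp = []
--         for j in range(attributeSize):
--             temp.append(tagList[i+j])
--         tagsTemp.append(temp)
--     boxTags = defaultdict(list)
--     i = 0
--     for tag in range(0, len(tagsTemp)):
--         boxTags[tagsTemp[i][0]["clusterId"]].append(tagsTemp[i])
--         i = i+1
--     for box in boxTags:
--         res = []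
--         for count in range(attributeSize):
--             nameTemp = {}
--             for tag in boxTags[box]:
--                 nameTemp.setdefault(tag[count]["name"], 0)
--                 nameTemp[tag[count]["name"]] = nameTemp[tag[count]["name"]]+1
--             nameRes = {"id":"","name":max(nameTemp,key=nameTemp.get), "colorHex":""}
--             res.append(nameRes)
--         tags[box].append(res)
--
--     return tags
-- ===== SOURCE B (Python) =====
-- from collections import defaultdict
--
-- def formTags(tagList, attributeSize):
--     # One pass: aggregate counts[clusterId][(position, name)] without ever
--     # materialising chunk lists or per-cluster chunk groups.
--     counts = {}
--     for i in range(0, len(tagList), attributeSize):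
--         cid = tagList[i]["clusterId"]
--         if cid not in counts:
--             counts[cid] = {}
--         d = counts[cid]
--         for j in range(attributeSize):
--             key = (j, tagList[i + j]["name"])
--             d[key] = d.get(key, 0) + 1
--     tags = defaultdict(list)
--     for cid, d in counts.items():
--         res = []
--         for j in range(attributeSize):
--             freq = {name: c for (pos, name), c in d.items() if pos == j}
--             res.append({"id": "", "name": max(freq, key=freq.get), "colorHex": ""})
--         tags[cid].append(res)
--     return tags
-- ===== Notes on version B (the rewrite author's own statement) =====
-- stated objective: alternative
-- what changed: B never materialises chunk lists or per-cluster chunk groups: a single pass over chunk starts aggregates a nested count table counts[clusterId][(position,name)], and a second pass picks the modal name per position from that table, whereas A builds tagsTemp chunks, groups whole chunks per cluster in boxTags, and re-scans each group once per position.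
import Mathlib
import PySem

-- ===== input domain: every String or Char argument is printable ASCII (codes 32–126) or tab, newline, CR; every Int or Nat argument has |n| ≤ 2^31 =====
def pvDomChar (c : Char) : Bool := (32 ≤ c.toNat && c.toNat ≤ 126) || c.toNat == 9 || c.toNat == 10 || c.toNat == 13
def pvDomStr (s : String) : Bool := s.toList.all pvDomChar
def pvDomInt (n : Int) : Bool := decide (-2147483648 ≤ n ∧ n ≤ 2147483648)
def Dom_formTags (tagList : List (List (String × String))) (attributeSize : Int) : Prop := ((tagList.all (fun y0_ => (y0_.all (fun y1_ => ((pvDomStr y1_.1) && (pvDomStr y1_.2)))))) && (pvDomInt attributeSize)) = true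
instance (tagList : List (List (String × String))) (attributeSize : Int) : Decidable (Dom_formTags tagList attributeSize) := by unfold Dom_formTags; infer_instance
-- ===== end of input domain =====

-- B replaces A's chunk materialisation + per-cluster chunk grouping by a one-pass nested
-- count table counts[clusterId][(position,name)]; same asymptotic cost (objective: alternative).

-- shared primitive helpers: the port of Python's d[k] (dict lookup, first match) and of max(d, key=d.get)
def pvGet (d : List (String × String)) (k : String) : String := (List.lookup k d).getD ""
def pvArgmax (d : PySem.Dict String Int) : String := (PySem.List.max? d.keys (fun s => d.getD s 0)).getD ""

-- ===== PORT A =====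
def formTags (tagList : List (List (String × String))) (attributeSize : Int) :
    List (String × List (List (List (String × String)))) :=
  let tagsTemp : List (List (List (String × String))) :=
    (PySem.List.pyRange 0 (tagList.length : Int) attributeSize).foldl
      (fun acc i =>
        acc ++ [(PySem.List.pyRange 0 attributeSize 1).foldl
          (fun temp j => temp ++ [PySem.List.pyGetD tagList (i + j) []]) []]) []
  let boxTags : PySem.Dict String (List (List (List (String × String)))) :=
    ((PySem.List.pyRange 0 (tagsTemp.length : Int) 1).foldl
      (fun (st : PySem.Dict String (List (List (List (String × String)))) × Int) _ =>
        let t := PySem.List.pyGetD tagsTemp st.2 []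
        (st.1.modify (pvGet (PySem.List.pyGetD t 0 []) "clusterId") [] (· ++ [t]), st.2 + 1))
      (PySem.Dict.empty, 0)).1
  let tags : PySem.Dict String (List (List (List (String × String)))) :=
    boxTags.keys.foldl
      (fun tags box =>
        let res : List (List (String × String)) :=
          (PySem.List.pyRange 0 attributeSize 1).foldl
            (fun res count =>
              let nameTemp : PySem.Dict String Int :=
                (boxTags.getD box []).foldl
                  (fun d tag =>
                    let nm := pvGet (PySem.List.pyGetD tag count []) "name"
                    let d' := d.setdefault nm 0
                    d'.insert nm (d'.getD nm 0 + 1)) PySem.Dict.empty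
              res ++ [[("id", ""), ("name", pvArgmax nameTemp), ("colorHex", "")]]) []
        tags.modify box [] (· ++ [res]))
      PySem.Dict.empty
  tags.items

-- ===== PORT B =====
def formTags_alt (tagList : List (List (String × String))) (attributeSize : Int) :
    List (String × List (List (List (String × String)))) :=
  let counts : PySem.Dict String (PySem.Dict (Int × String) Int) :=
    (PySem.List.pyRange 0 (tagList.length : Int) attributeSize).foldl
      (fun counts i =>
        let cid := pvGet (PySem.List.pyGetD tagList i []) "clusterId"
        let counts' := if counts.contains cid then counts else counts.insert cid PySem.Dict.empty
        let d : PySem.Dict (Int × String) Int := counts'.getD cid PySem.Dict.empty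
        let d' := (PySem.List.pyRange 0 attributeSize 1).foldl
          (fun d j =>
            let key : Int × String := (j, pvGet (PySem.List.pyGetD tagList (i + j) []) "name")
            d.insert key (d.getD key 0 + 1)) d
        counts'.insert cid d')
      PySem.Dict.empty
  let tags : PySem.Dict String (List (List (List (String × String)))) :=
    counts.items.foldl
      (fun tags p =>
        let res : List (List (String × String)) :=
          (PySem.List.pyRange 0 attributeSize 1).foldl
            (fun res j =>
              let freq : PySem.Dict String Int :=
                p.2.items.foldl
                  (fun f q => if q.1.1 == j then f.insert q.1.2 q.2 else f) PySem.Dict.empty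
              res ++ [[("id", ""), ("name", pvArgmax freq), ("colorHex", "")]]) []
        tags.modify p.1 [] (· ++ [res]))
      PySem.Dict.empty
  tags.items

-- ===== PRECONDITION & SPEC =====
-- Pre_ excludes exactly the inputs where the Python A raises: attributeSize = 0 (range ValueError);
-- for positive attributeSize, a length not divisible by it (IndexError) or a missing "clusterId" key
-- at a chunk start / missing "name" key anywhere (KeyError). Negative attributeSize is admitted (A returns {}).
def Pre_formTags (tagList : List (List (String × String))) (attributeSize : Int) : Prop :=
  attributeSize ≠ 0 ∧
  (0 < attributeSize →
    attributeSize ∣ (tagList.length : Int) ∧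
    ∀ m < tagList.length,
      (List.lookup "name" (tagList.getD m [])).isSome = true ∧
      ((m : Int) % attributeSize = 0 → (List.lookup "clusterId" (tagList.getD m [])).isSome = true))
instance (tagList : List (List (String × String))) (attributeSize : Int) : Decidable (Pre_formTags tagList attributeSize) := by unfold Pre_formTags; infer_instance

def pvWitness_formTags : (List (List (String × String))) × Int :=
  ([[("clusterId", "c1"), ("name", "a")], [("clusterId", "c1"), ("name", "b")],
    [("clusterId", "c2"), ("name", "a")], [("clusterId", "c1"), ("name", "b")]], 2)

def Spec_formTags (tagList : List (List (String × String))) (attributeSize : Int) (out : List (String × List (List (List (String × String))))) : Prop := out = formTags_alt tagList attributeSize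
instance (tagList : List (List (String × String))) (attributeSize : Int) (out : List (String × List (List (List (String × String))))) : Decidable (Spec_formTags tagList attributeSize out) := by unfold Spec_formTags; infer_instance

-- ===== CLAIM (what is proved, stated in full; the proofs are below) =====
def Claim_equal_formTags : Prop := ∀ (tagList : List (List (String × String))) (attributeSize : Int), Dom_formTags tagList attributeSize → Pre_formTags tagList attributeSize → Spec_formTags tagList attributeSize (formTags tagList attributeSize)

-- ===== LEMMAS AND PROOFS =====

theorem pv_foldl_idx {α σ : Type} (F : σ → α → σ) (d0 : α) (xs : List α) :
    ∀ (l : List Int) (s : σ) (m : Nat), m + l.length = xs.length →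
    (l.foldl (fun st _ => (F st.1 (PySem.List.pyGetD xs (st.2 : Int) d0), st.2 + 1)) (s, (m : Int))).1
      = (xs.drop m).foldl F s := by
  intro l
  induction l with
  | nil => intro s m h; simp at h ⊢; rw [List.drop_of_length_le (le_of_eq h.symm)]; rfl
  | cons x t ih =>
    intro s m h
    simp only [List.foldl_cons]
    have hm : m < xs.length := by simp at h; omega
    have h1 : ((m : Int) + 1) = ((m + 1 : Nat) : Int) := by push_cast; ring
    rw [h1, ih _ (m+1) (by simp at h ⊢; omega)]
    rw [List.drop_eq_getElem_cons hm, List.foldl_cons, PySem.List.pyGetD_natCast,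
      List.getD_eq_getElem _ _ hm]

theorem pv_ofList_filter {α : Type} [BEq α] [LawfulBEq α] (p : α → Bool) (xs : List α) :
    (PySem.Set.ofList xs).filter p = PySem.Set.ofList (xs.filter p) := by
  induction xs using List.reverseRecOn with
  | nil => rfl
  | append_singleton t x ih =>
    rw [PySem.Set.ofList_append_singleton, List.filter_append]
    by_cases hx : x ∈ t
    · rw [PySem.Set.add_of_mem ((PySem.Set.mem_ofList _ _).mpr hx)]
      by_cases hp : p x = true
      · have : List.filter p [x] = [x] := by simp [hp]
        rw [this, PySem.Set.ofList_append_singleton,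
          PySem.Set.add_of_mem ((PySem.Set.mem_ofList _ _).mpr (List.mem_filter.mpr ⟨hx, hp⟩)), ih]
      · have : List.filter p [x] = [] := by simp [hp]
        rw [this, List.append_nil, ih]
    · rw [PySem.Set.add_of_not_mem (fun hc => hx ((PySem.Set.mem_ofList _ _).mp hc)), List.filter_append]
      by_cases hp : p x = true
      · have : List.filter p [x] = [x] := by simp [hp]
        rw [this, PySem.Set.ofList_append_singleton,
          PySem.Set.add_of_not_mem
            (fun hc => hx (List.mem_filter.mp ((PySem.Set.mem_ofList _ _).mp hc)).1), ih]
      · have : List.filter p [x] = [] := by simp [hp]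
        rw [this, List.append_nil, List.append_nil, ih]

theorem pv_ofList_map_inj {α β : Type} [BEq α] [LawfulBEq α] [BEq β] [LawfulBEq β]
    (f : α → β) (hf : Function.Injective f) (xs : List α) :
    PySem.Set.ofList (xs.map f) = (PySem.Set.ofList xs).map f := by
  induction xs using List.reverseRecOn with
  | nil => rfl
  | append_singleton t x ih =>
    rw [List.map_append, List.map_singleton, PySem.Set.ofList_append_singleton,
      PySem.Set.ofList_append_singleton]
    by_cases hx : x ∈ t
    · rw [PySem.Set.add_of_mem ((PySem.Set.mem_ofList _ _).mpr hx),
        PySem.Set.add_of_mem (by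
          rw [ih] at *
          exact List.mem_map.mpr ⟨x, (PySem.Set.mem_ofList _ _).mpr hx, rfl⟩), ih]
    · rw [PySem.Set.add_of_not_mem (fun hc => hx ((PySem.Set.mem_ofList _ _).mp hc)),
        PySem.Set.add_of_not_mem (fun hc => by
          rw [ih] at hc
          obtain ⟨y, hy, hxy⟩ := List.mem_map.mp hc
          exact hx ((PySem.Set.mem_ofList _ _).mp ((hf hxy) ▸ hy))),
        List.map_append, ih]
      rfl


-- L2: a modify-append loop over fresh distinct keys builds exactly one item per element
theorem pv_items_modify_append {κ ν β : Type} [BEq κ] [LawfulBEq κ]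
    (key : β → κ) (h : β → ν) (l : List β) :
    ∀ (d : PySem.Dict κ (List ν)), (∀ x ∈ l, d.contains (key x) = false) → (l.map key).Nodup →
    (l.foldl (fun acc x => acc.modify (key x) [] (· ++ [h x])) d).items
      = d.items ++ l.map (fun x => (key x, [h x])) := by
  induction l with
  | nil => intro d _ _; simp
  | cons x t ih =>
    intro d hfresh hnd
    simp only [List.foldl_cons, List.map_cons, List.nodup_cons] at *
    have hx : d.contains (key x) = false := hfresh x List.mem_cons_self
    have hstep : d.modify (key x) [] (· ++ [h x]) = d.insert (key x) [h x] := by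
      show d.insert (key x) (d.getD (key x) [] ++ [h x]) = _
      rw [PySem.Dict.getD_of_not_contains _ _ hx]
      rfl
    rw [hstep, ih _ (fun y hy => by
        rw [PySem.Dict.contains_insert]
        have h1 : key y ≠ key x := fun hc => hnd.1 (hc ▸ List.mem_map.mpr ⟨y, hy, rfl⟩)
        simp [h1, hfresh y (List.mem_cons_of_mem _ hy)])
      hnd.2,
      PySem.Dict.items_insert_of_not_contains _ _ hx]
    simp

-- L4: inserting a list of pairs with distinct keys into an empty dict gives back the list
theorem pv_items_ofPairs {κ ν : Type} [BEq κ] [LawfulBEq κ] (l : List (κ × ν))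
    (hnd : (l.map Prod.fst).Nodup) :
    (l.foldl (fun d p => d.insert p.1 p.2) PySem.Dict.empty).items = l := by
  induction l using List.reverseRecOn with
  | nil => rfl
  | append_singleton t p ih =>
    rw [List.map_append] at hnd
    have hnd' := (List.nodup_append.mp hnd).1
    rw [List.foldl_append, List.foldl_cons, List.foldl_nil,
      PySem.Dict.items_insert_of_not_contains _ _ ?_, ih hnd']
    rw [← Bool.not_eq_true, PySem.Dict.contains_iff_mem_keys]
    intro hc
    have : p.1 ∈ t.map Prod.fst := by
      have hkeys : (t.foldl (fun d p => d.insert p.1 p.2) PySem.Dict.empty).keys = t.map Prod.fst := by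
        show (t.foldl (fun d p => d.insert p.1 p.2) PySem.Dict.empty).items.map Prod.fst = _
        rw [ih hnd']
      rwa [hkeys] at hc
    exact (List.nodup_append.mp hnd).2.2 p.1 this p.1 (by simp) rfl

def pvCid (tl : List (List (String × String))) (i : Int) : String := pvGet (PySem.List.pyGetD tl i []) "clusterId"
def pvNm (tl : List (List (String × String))) (i j : Int) : String := pvGet (PySem.List.pyGetD tl (i + j) []) "name"
def pvPairs (tl : List (List (String × String))) (k i : Int) : List (Int × String) :=
  (PySem.List.pyRange 0 k 1).map (fun j => (j, pvNm tl i j))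
def pvSel (tl : List (List (String × String))) (is : List Int) (b : String) : List Int :=
  is.filter (fun i => pvCid tl i == b)
def pvPs (tl : List (List (String × String))) (k : Int) (is : List Int) (b : String) : List (Int × String) :=
  (pvSel tl is b).flatMap (pvPairs tl k)

def pvStepB (tl : List (List (String × String))) (k : Int)
    (counts : PySem.Dict String (PySem.Dict (Int × String) Int)) (i : Int) :
    PySem.Dict String (PySem.Dict (Int × String) Int) :=
  (if counts.contains (pvGet (PySem.List.pyGetD tl i []) "clusterId") = true then counts
      else counts.insert (pvGet (PySem.List.pyGetD tl i []) "clusterId") PySem.Dict.empty).insert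
    (pvGet (PySem.List.pyGetD tl i []) "clusterId")
    (List.foldl
      (fun d j =>
        d.insert (j, pvGet (PySem.List.pyGetD tl (i + j) []) "name")
          (d.getD (j, pvGet (PySem.List.pyGetD tl (i + j) []) "name") 0 + 1))
      ((if counts.contains (pvGet (PySem.List.pyGetD tl i []) "clusterId") = true then counts
          else counts.insert (pvGet (PySem.List.pyGetD tl i []) "clusterId") PySem.Dict.empty).getD
        (pvGet (PySem.List.pyGetD tl i []) "clusterId") PySem.Dict.empty)
      (PySem.List.pyRange 0 k))

theorem pv_counter_extend (xs ys : List (Int × String)) :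
    ys.foldl (fun d x => d.insert x (d.getD x 0 + 1)) (PySem.Dict.counter xs)
      = PySem.Dict.counter (xs ++ ys) := by
  rw [PySem.Dict.counter_eq_foldl, PySem.Dict.counter_eq_foldl, List.foldl_append]
  rfl

theorem pv_counts_items (tl : List (List (String × String))) (k : Int) (is : List Int) :
    (is.foldl (pvStepB tl k) PySem.Dict.empty).items
      = (PySem.Set.ofList (is.map (pvCid tl))).map
          (fun b => (b, PySem.Dict.counter (pvPs tl k is b))) := by
  induction is using List.reverseRecOn with
  | nil => rfl
  | append_singleton t i ih =>
    rw [List.foldl_append, List.foldl_cons, List.foldl_nil]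
    set C := List.foldl (pvStepB tl k) PySem.Dict.empty t with hC
    have hkeys : C.keys = PySem.Set.ofList (t.map (pvCid tl)) := by
      show C.items.map Prod.fst = _
      rw [ih, List.map_map]
      rw [show (Prod.fst ∘ fun b => (b, PySem.Dict.counter (pvPs tl k t b))) = id from rfl, List.map_id]
    have hnd : C.keys.Nodup := hkeys ▸ PySem.Set.nodup_ofList _
    have hinner : ∀ d0 : PySem.Dict (Int × String) Int,
        List.foldl
          (fun d j =>
            d.insert (j, pvGet (PySem.List.pyGetD tl (i + j) []) "name")
              (d.getD (j, pvGet (PySem.List.pyGetD tl (i + j) []) "name") 0 + 1))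
          d0 (PySem.List.pyRange 0 k)
        = (pvPairs tl k i).foldl (fun d x => d.insert x (d.getD x 0 + 1)) d0 := by
      intro d0
      rw [pvPairs, List.foldl_map]
      rfl
    rw [List.map_append, show List.map (pvCid tl) [i] = [pvCid tl i] from rfl,
      PySem.Set.ofList_append_singleton]
    by_cases hmem : pvCid tl i ∈ t.map (pvCid tl)
    · have hcont : C.contains (pvCid tl i) = true :=
        (PySem.Dict.contains_iff_mem_keys _ _).mpr
          (hkeys ▸ (PySem.Set.mem_ofList _ _).mpr hmem)
      have hget : C.getD (pvCid tl i) PySem.Dict.empty = PySem.Dict.counter (pvPs tl k t (pvCid tl i)) :=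
        PySem.Dict.getD_of_mem_items C (by
          rw [ih]
          exact List.mem_map.mpr ⟨pvCid tl i, (PySem.Set.mem_ofList _ _).mpr hmem, rfl⟩) hnd _
      rw [pvStepB]
      rw [show pvGet (PySem.List.pyGetD tl i []) "clusterId" = pvCid tl i from rfl]
      rw [hcont, if_pos rfl, hinner, hget, pv_counter_extend]
      rw [PySem.Dict.items_insert_of_contains _ _ hcont, ih]
      rw [PySem.Set.add_of_mem ((PySem.Set.mem_ofList _ _).mpr hmem)]
      rw [List.map_map]
      apply List.map_congr_left
      intro b hb
      simp only [Function.comp]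
      by_cases hbc : b = pvCid tl i
      · rw [if_pos (by simp [hbc])]
        have hps : pvPs tl k (t ++ [i]) b = pvPs tl k t b ++ pvPairs tl k i := by
          rw [pvPs, pvPs, pvSel, pvSel, List.filter_append,
            show List.filter (fun i' => pvCid tl i' == b) [i] = [i] by simp [hbc],
            List.flatMap_append]
          simp
        rw [hps, hbc]
      · rw [if_neg (by simp [hbc])]
        have : pvPs tl k (t ++ [i]) b = pvPs tl k t b := by
          rw [pvPs, pvPs, pvSel, pvSel, List.filter_append, List.flatMap_append]
          have : List.filter (fun i' => pvCid tl i' == b) [i] = [] := by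
            simp [Ne.symm hbc]
          rw [this]
          simp
        rw [this]
    · have hcont : C.contains (pvCid tl i) = false := by
        rw [← Bool.not_eq_true, PySem.Dict.contains_iff_mem_keys, hkeys, PySem.Set.mem_ofList]
        exact hmem
      rw [pvStepB]
      rw [show pvGet (PySem.List.pyGetD tl i []) "clusterId" = pvCid tl i from rfl]
      rw [hcont]
      simp only [Bool.false_eq_true, if_false]
      rw [PySem.Dict.getD_insert_self, hinner]
      have hd' : (pvPairs tl k i).foldl (fun d x => d.insert x (d.getD x 0 + 1)) PySem.Dict.empty
          = PySem.Dict.counter (pvPairs tl k i) := by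
        have := pv_counter_extend [] (pvPairs tl k i)
        simpa using this
      rw [hd']
      have hcont2 : (C.insert (pvCid tl i) PySem.Dict.empty).contains (pvCid tl i) = true :=
        PySem.Dict.contains_insert_self _ _ _
      rw [PySem.Dict.items_insert_of_contains _ _ hcont2,
        PySem.Dict.items_insert_of_not_contains _ _ hcont, ih]
      rw [PySem.Set.add_of_not_mem (fun hc => hmem ((PySem.Set.mem_ofList _ _).mp hc))]
      rw [List.map_append, List.map_append, List.map_map]
      congr 1
      · apply List.map_congr_left
        intro b hb
        simp only [Function.comp]
        have hbc : b ≠ pvCid tl i := fun hc => hmem (hc ▸ (PySem.Set.mem_ofList _ _).mp hb)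
        rw [if_neg (by simp [hbc])]
        have : pvPs tl k (t ++ [i]) b = pvPs tl k t b := by
          rw [pvPs, pvPs, pvSel, pvSel, List.filter_append, List.flatMap_append]
          have : List.filter (fun i' => pvCid tl i' == b) [i] = [] := by
            simp [Ne.symm hbc]
          rw [this]
          simp
        rw [this]
      · simp only [List.map_cons, List.map_nil]
        have hsel : pvSel tl t (pvCid tl i) = [] := by
          rw [pvSel, List.filter_eq_nil_iff]
          intro a ha hc
          exact hmem (by
            rw [beq_iff_eq] at hc
            exact hc ▸ List.mem_map.mpr ⟨a, ha, rfl⟩)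
        have hps : pvPs tl k (t ++ [i]) (pvCid tl i) = pvPairs tl k i := by
          rw [pvPs, pvSel, List.filter_append]
          rw [show List.filter (fun i' => pvCid tl i' == pvCid tl i) t = pvSel tl t (pvCid tl i) from rfl,
            hsel]
          simp
        rw [hps]
        simp

def pvNames (tl : List (List (String × String))) (is : List Int) (b : String) (j : Int) : List String :=
  (pvSel tl is b).map (fun i => pvNm tl i j)

theorem pv_freq_eq (tl : List (List (String × String))) (k : Int) (is : List Int) (b : String)
    (j : Int) (hj : j ∈ PySem.List.pyRange 0 k 1) :
    (PySem.Dict.counter (pvPs tl k is b)).items.foldl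
        (fun f q => if q.1.1 == j then f.insert q.1.2 q.2 else f) PySem.Dict.empty
      = PySem.Dict.counter (pvNames tl is b j) := by
  set ps := pvPs tl k is b with hps
  set ns := pvNames tl is b j with hns
  have hfil : ps.filter (fun q => q.1 == j) = ns.map (Prod.mk j) := by
    rw [hps, pvPs, List.filter_flatMap]
    have h1 : ∀ i : Int, (pvPairs tl k i).filter (fun q => q.1 == j) = [(j, pvNm tl i j)] := by
      intro i
      rw [pvPairs, List.filter_map]
      have : ((PySem.List.pyRange 0 k 1).filter ((fun (q : Int × String) => q.1 == j) ∘ fun j' => (j', pvNm tl i j'))) = [j] := by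
        rw [show ((fun (q : Int × String) => q.1 == j) ∘ fun j' => (j', pvNm tl i j')) = (fun j' => j' == j) from rfl]
        rw [List.filter_beq, List.count_eq_one_of_mem (PySem.List.nodup_pyRange_one _ _) hj]
        rfl
      rw [this]
      rfl
    simp only [h1]
    rw [hns, pvNames, List.map_map]
    exact Eq.symm List.map_eq_flatMap
  -- step 1: comprehension = dictOfPairs over the filtered items
  rw [show List.foldl (fun f q => if (q.1.1 == j) = true then f.insert q.1.2 q.2 else f)
        PySem.Dict.empty (PySem.Dict.counter ps).items
      = List.foldl (fun (f : PySem.Dict String Int) (q : (Int × String) × Int) => f.insert q.1.2 q.2)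
        PySem.Dict.empty ((PySem.Dict.counter ps).items.filter (fun q => q.1.1 == j))
    from PySem.List.foldl_if_eq_foldl_filter _ _ _ _]
  rw [PySem.Dict.items_counter]
  rw [List.filter_map]
  rw [show ((fun q : (Int × String) × Int => q.1.1 == j) ∘ fun q => (q, (List.count q ps : Int)))
      = (fun q : Int × String => q.1 == j) from rfl]
  rw [pv_ofList_filter, hfil, pv_ofList_map_inj (Prod.mk j) (fun a b h => by simpa using h)]
  rw [← List.foldl_map (f := fun q : (Int × String) × Int => (q.1.2, q.2))
      (g := fun (f : PySem.Dict String Int) (p : String × Int) => f.insert p.1 p.2)]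
  rw [List.map_map, List.map_map]
  have hcnt : ∀ v ∈ PySem.Set.ofList ns,
      (((fun q : (Int × String) × Int => (q.1.2, q.2)) ∘ (fun q : Int × String => (q, (List.count q ps : Int)))) ∘ Prod.mk j) v
        = (v, (List.count v ns : Int)) := by
    intro v _
    simp only [Function.comp]
    congr 1
    rw [← List.count_filter (p := fun q : Int × String => q.1 == j) (by simp), hfil,
      List.count_map_of_injective _ _ (fun a b h => by simpa using h)]
  rw [List.map_congr_left hcnt]
  apply PySem.Dict.ext
  rw [pv_items_ofPairs]
  · rw [PySem.Dict.items_counter]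
  · rw [List.map_map]
    rw [show (Prod.fst ∘ fun v => (v, (List.count v ns : Int))) = id from rfl, List.map_id]
    exact PySem.Set.nodup_ofList _

def pvEntry (nm : String) : List (String × String) := [("id", ""), ("name", nm), ("colorHex", "")]
def pvRes (tl : List (List (String × String))) (k : Int) (is : List Int) (b : String) :
    List (List (String × String)) :=
  (PySem.List.pyRange 0 k 1).map (fun j => pvEntry (pvArgmax (PySem.Dict.counter (pvNames tl is b j))))
def pvNF (tl : List (List (String × String))) (k : Int) :
    List (String × List (List (List (String × String)))) :=
  (PySem.Set.ofList ((PySem.List.pyRange 0 (tl.length : Int) k).map (pvCid tl))).map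
    (fun b => (b, [pvRes tl k (PySem.List.pyRange 0 (tl.length : Int) k) b]))

theorem pv_B_norm (tl : List (List (String × String))) (k : Int) :
    formTags_alt tl k = pvNF tl k := by
  simp only [formTags_alt]
  rw [show (List.foldl
            (fun counts i =>
              (if counts.contains (pvGet (PySem.List.pyGetD tl i []) "clusterId") = true then counts
                  else counts.insert (pvGet (PySem.List.pyGetD tl i []) "clusterId") PySem.Dict.empty).insert
                (pvGet (PySem.List.pyGetD tl i []) "clusterId")
                (List.foldl
                  (fun d j =>
                    d.insert (j, pvGet (PySem.List.pyGetD tl (i + j) []) "name")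
                      (d.getD (j, pvGet (PySem.List.pyGetD tl (i + j) []) "name") 0 + 1))
                  ((if counts.contains (pvGet (PySem.List.pyGetD tl i []) "clusterId") = true then counts
                      else counts.insert (pvGet (PySem.List.pyGetD tl i []) "clusterId") PySem.Dict.empty).getD
                    (pvGet (PySem.List.pyGetD tl i []) "clusterId") PySem.Dict.empty)
                  (PySem.List.pyRange 0 k)))
            PySem.Dict.empty (PySem.List.pyRange 0 (tl.length : Int) k))
      = List.foldl (pvStepB tl k) PySem.Dict.empty (PySem.List.pyRange 0 (tl.length : Int) k) from rfl]
  set C := List.foldl (pvStepB tl k) PySem.Dict.empty (PySem.List.pyRange 0 (tl.length : Int) k) with hC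
  have hitems := pv_counts_items tl k (PySem.List.pyRange 0 (tl.length : Int) k)
  rw [← hC] at hitems
  have hndk : (C.items.map Prod.fst).Nodup := by
    rw [hitems, List.map_map,
      show (Prod.fst ∘ fun b => (b, PySem.Dict.counter (pvPs tl k (PySem.List.pyRange 0 (tl.length : Int) k) b))) = id from rfl,
      List.map_id]
    exact PySem.Set.nodup_ofList _
  rw [pv_items_modify_append (key := Prod.fst)
      (h := fun p : String × PySem.Dict (Int × String) Int =>
        List.foldl
          (fun res j =>
            res ++
              [[("id", ""),
                  ("name",
                    pvArgmax
                      (List.foldl (fun f q => if (q.1.1 == j) = true then f.insert q.1.2 q.2 else f)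
                        PySem.Dict.empty p.2.items)),
                  ("colorHex", "")]])
          [] (PySem.List.pyRange 0 k))
      C.items PySem.Dict.empty (fun x _ => PySem.Dict.contains_empty _) hndk]
  rw [hitems, List.map_map]
  rw [show PySem.Dict.empty.items = ([] : List (String × List (List (List (String × String))))) from rfl,
    List.nil_append]
  rw [pvNF]
  apply List.map_congr_left
  intro b hb
  simp only [Function.comp]
  congr 1
  rw [PySem.List.foldl_append_singleton_eq_map, List.nil_append, pvRes]
  congr 1
  apply List.map_congr_left
  intro j hj
  rw [pv_freq_eq tl k _ b j hj]
  rfl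

theorem pv_range_nonpos (n : Nat) (k : Int) (hk : ¬ 0 < k) : PySem.List.pyRange 0 (n : Int) k = [] := by
  unfold PySem.List.pyRange
  by_cases h0 : k = 0
  · rw [if_pos h0]
  · rw [if_neg h0]
    simp [hk, show ¬ ((n : Int) < 0) by omega]

theorem pv_setdefault_insert (d : PySem.Dict String Int) (nm : String) :
    (d.setdefault nm 0).insert nm ((d.setdefault nm 0).getD nm 0 + 1)
      = d.insert nm (d.getD nm 0 + 1) := by
  rw [PySem.Dict.getD_setdefault_self]
  by_cases hc : d.contains nm = true
  · rw [PySem.Dict.setdefault_of_contains _ _ hc]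
  · rw [PySem.Dict.setdefault_of_not_contains _ _ (by rwa [Bool.not_eq_true] at hc),
      PySem.Dict.insert_insert_self]

def pvChunk (tl : List (List (String × String))) (k i : Int) : List (List (String × String)) :=
  (PySem.List.pyRange 0 k 1).map (fun j => PySem.List.pyGetD tl (i + j) [])

theorem pv_A_norm (tl : List (List (String × String))) (k : Int)
    (hk : 0 < k ∨ PySem.List.pyRange 0 (tl.length : Int) k = []) :
    formTags tl k = pvNF tl k := by
  have hknil : ¬ 0 < k → PySem.List.pyRange 0 (tl.length : Int) k = [] :=
    fun h => pv_range_nonpos tl.length k h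
  simp only [formTags]
  set is := PySem.List.pyRange 0 (tl.length : Int) k with his
  -- step 1: tagsTemp is the list of chunks
  have htemp : (List.foldl (fun acc i => acc ++
        [List.foldl (fun temp j => temp ++ [PySem.List.pyGetD tl (i + j) []]) []
          (PySem.List.pyRange 0 k)]) [] is)
      = is.map (pvChunk tl k) := by
    rw [PySem.List.foldl_append_singleton_eq_map, List.nil_append]
    apply List.map_congr_left
    intro i _
    rw [PySem.List.foldl_append_singleton_eq_map, List.nil_append]
    rfl
  rw [htemp]
  -- step 2: the index-counter loop is a fold over the chunk list
  rw [show ((PySem.Dict.empty : PySem.Dict String (List (List (List (String × String))))), (0 : Int))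
      = ((PySem.Dict.empty : PySem.Dict String (List (List (List (String × String))))), ((0 : Nat) : Int)) from rfl]
  have hmid : (List.foldl
        (fun (st : PySem.Dict String (List (List (List (String × String)))) × Int) (x : Int) =>
          (st.1.modify
              (pvGet (PySem.List.pyGetD (PySem.List.pyGetD (List.map (pvChunk tl k) is) st.2 []) 0 []) "clusterId")
              [] fun x => x ++ [PySem.List.pyGetD (List.map (pvChunk tl k) is) st.2 []],
            st.2 + 1))
        ((PySem.Dict.empty : PySem.Dict String (List (List (List (String × String))))), ((0 : Nat) : Int))
        (PySem.List.pyRange 0 ((List.map (pvChunk tl k) is).length : Int))).1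
      = ((List.map (pvChunk tl k) is).drop 0).foldl
          (fun d t => d.modify (pvGet (PySem.List.pyGetD t 0 []) "clusterId") [] (fun x => x ++ [t]))
          PySem.Dict.empty :=
    pv_foldl_idx
      (fun d t => d.modify (pvGet (PySem.List.pyGetD t 0 []) "clusterId") [] (fun x => x ++ [t]))
      [] (List.map (pvChunk tl k) is)
      (PySem.List.pyRange 0 ((List.map (pvChunk tl k) is).length : Int)) PySem.Dict.empty 0
      (by simp [PySem.List.length_pyRange_one])
  rw [hmid, List.drop_zero]
  -- step 3: rewrite the grouping fold over keys pvCid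
  have hbox2 : (is.map (pvChunk tl k)).foldl
      (fun d t => d.modify (pvGet (PySem.List.pyGetD t 0 []) "clusterId") [] (fun x => x ++ [t]))
      PySem.Dict.empty
      = is.foldl (fun d i => d.modify (pvCid tl i) [] (fun x => x ++ [pvChunk tl k i]))
        PySem.Dict.empty := by
    rw [List.foldl_map]
    apply PySem.List.foldl_congr_mem
    intro acc i hi
    rcases hk with hk | hnil
    · have h0 : PySem.List.pyGetD (pvChunk tl k i) 0 [] = PySem.List.pyGetD tl (i + 0) [] := by
        rw [pvChunk]
        exact PySem.List.pyGetD_map_pyRange_of_nonneg _ k 0 [] le_rfl hk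
      rw [h0, add_zero]
      rfl
    · rw [hnil] at hi
      cases hi
  rw [hbox2]
  set BT := is.foldl (fun d i => d.modify (pvCid tl i) [] (fun x => x ++ [pvChunk tl k i]))
    PySem.Dict.empty with hBT
  have hkeys : BT.keys = PySem.Set.ofList (is.map (pvCid tl)) := by
    rw [hBT, PySem.Dict.keys_foldl_modify_key is (pvCid tl) []
      (fun _ i => (fun x => x ++ [pvChunk tl k i]))]
    rw [show (PySem.Dict.empty : PySem.Dict String (List (List (List (String × String))))).keys
      = PySem.Set.empty from rfl]
    exact PySem.Set.update_empty _
  have hgetD : ∀ b, BT.getD b [] = (pvSel tl is b).map (pvChunk tl k) := by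
    intro b
    have hpair : BT = (is.map (fun i => (pvCid tl i, pvChunk tl k i))).foldl
        (fun (d : PySem.Dict String (List (List (List (String × String))))) p =>
          d.modify p.1 [] (fun x => x ++ [p.2])) PySem.Dict.empty := by
      rw [List.foldl_map]
    rw [hpair, PySem.Dict.getD_foldl_modify_append]
    rw [PySem.Dict.getD_empty, List.nil_append, List.filter_map]
    rw [show ((fun p : String × List (List (String × String)) => p.1 == b)
        ∘ (fun i => (pvCid tl i, pvChunk tl k i))) = (fun i => pvCid tl i == b) from rfl]
    rw [List.map_map]
    rfl
  -- step 4: the output loop appends one item per box key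
  rw [pv_items_modify_append (key := fun b : String => b)
      (h := fun box =>
        List.foldl
          (fun res count =>
            res ++
              [[("id", ""),
                  ("name",
                    pvArgmax
                      (List.foldl
                        (fun d tag =>
                          (d.setdefault (pvGet (PySem.List.pyGetD tag count []) "name") 0).insert
                            (pvGet (PySem.List.pyGetD tag count []) "name")
                            ((d.setdefault (pvGet (PySem.List.pyGetD tag count []) "name") 0).getD
                                (pvGet (PySem.List.pyGetD tag count []) "name") 0 +
                              1))
                        PySem.Dict.empty (BT.getD box []))),
                  ("colorHex", "")]])
          [] (PySem.List.pyRange 0 k))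
      BT.keys PySem.Dict.empty (fun x _ => PySem.Dict.contains_empty _)
      (by rw [List.map_id']; exact hkeys ▸ PySem.Set.nodup_ofList _)]
  rw [show (PySem.Dict.empty : PySem.Dict String (List (List (List (String × String))))).items
    = [] from rfl, List.nil_append, hkeys, pvNF, ← his]
  apply List.map_congr_left
  intro b hb
  congr 1
  rw [hgetD b, PySem.List.foldl_append_singleton_eq_map, List.nil_append, pvRes]
  congr 1
  apply List.map_congr_left
  intro count hcount
  have hcnt' : 0 ≤ count ∧ count < k := PySem.List.mem_pyRange_one.mp hcount
  congr 2
  -- nameTemp = counter of the names at this position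
  rw [List.foldl_map]
  rw [PySem.List.foldl_congr_mem _ _
    (fun d i => d.insert (pvNm tl i count) (d.getD (pvNm tl i count) 0 + 1)) _
    (fun acc i _ => by
      have hz : PySem.List.pyGetD (pvChunk tl k i) count [] = PySem.List.pyGetD tl (i + count) [] := by
        rw [pvChunk]
        exact PySem.List.pyGetD_map_pyRange_of_nonneg _ k count [] hcnt'.1 hcnt'.2
      rw [hz]
      exact pv_setdefault_insert acc (pvNm tl i count))]
  rw [show (fun (d : PySem.Dict String Int) (i : Int) =>
        d.insert (pvNm tl i count) (d.getD (pvNm tl i count) 0 + 1))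
      = (fun d i => (fun (d : PySem.Dict String Int) (x : String) =>
          d.insert x (d.getD x 0 + 1)) d ((fun i => pvNm tl i count) i)) from rfl,
    ← List.foldl_map (f := fun i => pvNm tl i count)
      (g := fun (d : PySem.Dict String Int) (x : String) => d.insert x (d.getD x 0 + 1))]
  rw [PySem.Dict.foldl_insert_getD_add_one_eq_counter]
  rfl

-- ===== VERDICT (by name: the statement is the Claim_ definition above) =====
theorem formTags_spec : Claim_equal_formTags := by
  intro tagList attributeSize _ _
  show formTags tagList attributeSize = formTags_alt tagList attributeSize
  rw [pv_B_norm]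
  apply pv_A_norm
  by_cases hk : 0 < attributeSize
  · exact Or.inl hk
  · exact Or.inr (pv_range_nonpos _ _ hk)
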